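-- pv_equiv track=rewrite | github.com/SIDED00R/Code_training | 프로그래머스/unrated/135808. 과일 장수/과일 장수.py | solution
-- ===== SOURCE A (Python) =====
-- def solution(k, m, score):
--     many = []
--     answer = 0
--     left = 0
--     for num in range(1, k + 1):
--         many.append(score.count(num))
--     for n in range(k, 0, -1):
--         answer += ((many[n - 1] + left) // m) * n * m
--         left = (many[n - 1] + left) % m
--     return answer
-- ===== SOURCE B (Python) =====
-- def solution(k, m, score):
--     # Count only scores in [1, k] with one pass over score, then walk values
--     # top-down keeping the running suffix count: each value contributes m * (suffix // m).
--     cnt = {}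
--     for s in score:
--         if 1 <= s <= k:
--             cnt[s] = cnt.get(s, 0) + 1
--     answer = 0
--     suffix = 0
--     for n in range(k, 0, -1):
--         suffix += cnt.get(n, 0)
--         answer += (suffix // m) * m
--     return answer
-- ===== Notes on version B (the rewrite author's own statement) =====
-- stated objective: faster
-- what changed: B counts scores in [1,k] once into a dict instead of calling score.count(num) for every num in 1..k, and replaces the carry (left) loop by a running suffix count with answer += (suffix // m) * m per value, dropping the many[] table and the *n multiplication.
-- outside the precondition, e.g. on solution(2, 0, [1, 2]): A raises ZeroDivisionError, B raises ZeroDivisionError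
import Mathlib
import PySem

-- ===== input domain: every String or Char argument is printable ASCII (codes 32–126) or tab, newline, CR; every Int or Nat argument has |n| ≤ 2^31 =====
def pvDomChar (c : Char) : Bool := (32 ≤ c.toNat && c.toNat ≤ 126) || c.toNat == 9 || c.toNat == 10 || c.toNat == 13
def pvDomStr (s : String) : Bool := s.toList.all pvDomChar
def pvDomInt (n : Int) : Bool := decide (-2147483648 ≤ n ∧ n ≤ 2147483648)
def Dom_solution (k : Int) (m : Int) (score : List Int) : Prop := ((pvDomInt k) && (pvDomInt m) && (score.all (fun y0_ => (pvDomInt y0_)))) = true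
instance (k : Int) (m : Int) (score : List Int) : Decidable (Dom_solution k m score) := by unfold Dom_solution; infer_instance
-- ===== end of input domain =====

-- B replaces A's per-value rescans of `score` and carry loop by a one-pass dict count
-- plus a suffix-count scan (each value contributes m * (suffix // m)); objective: faster.

-- ===== PORT A =====
-- Python list indexing xs[i] on an Array carrier, exact step for step: one negative wrap,
-- none = IndexError (an Array is used so the port indexes in O(1) like CPython's list).
def pyGetArr? {α : Type} (xs : Array α) (i : Int) : Option α :=
  let j := if i < 0 then i + (xs.size : Int) else i
  if 0 ≤ j then xs[j.toNat]? else none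

def solution (k : Int) (m : Int) (score : List Int) : Int :=
  -- many.append(score.count(num)) for num in range(1, k+1)  (append = Array.push)
  let many : Array Int :=
    (PySem.List.pyRange 1 (k + 1) 1).foldl
      (fun acc num => acc.push (PySem.List.count score num : Int)) #[]
  -- for n in range(k, 0, -1): answer += ((many[n-1]+left)//m)*n*m; left = (many[n-1]+left)%m
  -- many[n-1]: n ∈ [1,k] so the index is always in range; pyGetArr? is some and getD's default is unreachable
  let st :=
    (PySem.List.pyRange k 0 (-1)).foldl
      (fun (st : Int × Int) n =>
        let c := (pyGetArr? many (n - 1)).getD 0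
        (st.1 + PySem.Int.floordiv (c + st.2) m * n * m,
         PySem.Int.mod (c + st.2) m))
      (0, 0)
  st.1

-- ===== PORT B =====
def solution_alt (k : Int) (m : Int) (score : List Int) : Int :=
  -- cnt[s] = cnt.get(s, 0) + 1 for s in score if 1 <= s <= k
  let cnt : PySem.Dict Int Int :=
    score.foldl
      (fun d s => if 1 ≤ s ∧ s ≤ k then d.insert s (d.getD s 0 + 1) else d)
      PySem.Dict.empty
  -- for n in range(k, 0, -1): suffix += cnt.get(n, 0); answer += (suffix // m) * m
  let st :=
    (PySem.List.pyRange k 0 (-1)).foldl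
      (fun (st : Int × Int) n =>
        let suffix := st.2 + cnt.getD n 0
        (st.1 + PySem.Int.floordiv suffix m * m, suffix))
      (0, 0)
  st.1

-- ===== PRECONDITION & SPEC =====
-- Pre_ excludes exactly the inputs where Python A raises ZeroDivisionError: m = 0 with k ≥ 1
-- (for k < 1 both loops are empty, so m = 0 is harmless and A returns 0).
def Pre_solution (k : Int) (m : Int) (score : List Int) : Prop := m ≠ 0 ∨ k < 1
instance (k : Int) (m : Int) (score : List Int) : Decidable (Pre_solution k m score) := by unfold Pre_solution; infer_instance
def pvWitness_solution : Int × Int × List Int := (3, 2, [1, 3, 3, 2, 3])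
def Spec_solution (k : Int) (m : Int) (score : List Int) (out : Int) : Prop := out = solution_alt k m score
instance (k : Int) (m : Int) (score : List Int) (out : Int) : Decidable (Spec_solution k m score out) := by unfold Spec_solution; infer_instance

-- ===== CLAIM (what is proved, stated in full; the proofs are below) =====
def Claim_equal_solution : Prop := ∀ (k : Int) (m : Int) (score : List Int), Dom_solution k m score → Pre_solution k m score → Spec_solution k m score (solution k m score)

-- ===== LEMMAS AND PROOFS =====

-- floor division shifts by exact multiples of the divisor (m ≠ 0)
lemma fd_shift (x t m : Int) (hm : m ≠ 0) :
    PySem.Int.floordiv (x + t * m) m = PySem.Int.floordiv x m + t := by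
  simp [PySem.Int.floordiv]
  exact Int.add_mul_fdiv_right x t hm

lemma md_shift (x t m : Int) :
    PySem.Int.mod (x + t * m) m = PySem.Int.mod x m := by
  simp [PySem.Int.mod]

lemma md_zero (m : Int) : PySem.Int.mod 0 m = 0 := by simp [PySem.Int.mod]

lemma fd_zero (m : Int) : PySem.Int.floordiv 0 m = 0 := by simp [PySem.Int.floordiv]

-- The two countdown loops, run over range(n, 0, -1) with an arbitrary count function g:
-- A's carry loop and B's suffix loop differ by the stated closed-form offset.
lemma loop_eq (m : Int) (hm : m ≠ 0) (g : Int → Int) :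
    ∀ (j : Nat) (n : Int), n = (j : Int) → ∀ (a b s : Int),
    ((PySem.List.pyRange n 0 (-1)).foldl
        (fun (st : Int × Int) x =>
          (st.1 + PySem.Int.floordiv (g x + st.2) m * x * m,
           PySem.Int.mod (g x + st.2) m))
        (a, PySem.Int.mod s m)).1
      = ((PySem.List.pyRange n 0 (-1)).foldl
          (fun (st : Int × Int) x =>
            (st.1 + PySem.Int.floordiv (st.2 + g x) m * m, st.2 + g x))
          (b, s)).1
        + (a - b - n * m * PySem.Int.floordiv s m) := by
  intro j
  induction j with
  | zero =>
      intro n hn a b s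
      subst hn
      simp [PySem.List.pyRange_neg_one_eq_nil (by omega : (0:Int) ≤ 0)]
  | succ j ih =>
      intro n hn a b s
      rw [PySem.List.pyRange_neg_one_cons (by omega : (0:Int) < n)]
      simp only [List.foldl_cons]
      have hsum : g n + PySem.Int.mod s m
          = (s + g n) + (-(PySem.Int.floordiv s m)) * m := by
        have h := PySem.Int.floordiv_mul_add_mod s m
        ring_nf
        ring_nf at h
        omega
      rw [hsum, fd_shift _ _ _ hm, md_shift]
      have H := ih (n - 1) (by omega)
        (a + (PySem.Int.floordiv (s + g n) m + -PySem.Int.floordiv s m) * n * m)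
        (b + PySem.Int.floordiv (s + g n) m * m) (s + g n)
      rw [H]
      ring

-- an append-only loop into an Array is the mapped list, converted
lemma foldl_push_map {α β : Type} (l : List α) (f : α → β) :
    l.foldl (fun a x => a.push (f x)) #[] = (l.map f).toArray := by
  induction l using List.reverseRecOn with
  | nil => rfl
  | append_singleton xs x ih => simp [ih]

-- a nonnegative Python index into the Array carrier is the list lookup
lemma pyGetArr?_list {α : Type} (l : List α) (i : Int) (h0 : 0 ≤ i) (d : α) :
    (pyGetArr? l.toArray i).getD d = PySem.List.pyGetD l i d := by
  rw [PySem.List.pyGetD_of_nonneg l d h0]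
  simp [pyGetArr?, if_neg (show ¬ i < 0 by omega), h0, List.getD_eq_getElem?_getD]

-- A's table lookup many[n-1] is score.count(x) for x ∈ [1, k]
lemma A_count (k : Int) (score : List Int) (x : Int) (hx : 0 < x) (hxk : x ≤ k) :
    (pyGetArr? ((PySem.List.pyRange 1 (k+1) 1).foldl
        (fun acc num => acc.push (PySem.List.count score num : Int)) #[]) (x-1)).getD 0
      = (List.count x score : Int) := by
  rw [foldl_push_map, pyGetArr?_list _ _ (by omega)]
  have hidx : x - 1 = (((x-1).toNat : Nat) : Int) := by omega
  show PySem.List.pyGetD _ (x-1) 0 = _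
  rw [hidx, PySem.List.pyGetD_map_pyRange_one _ 1 (k+1) _ 0 (by omega)]
  have h2 : (1 : Int) + ((x-1).toNat : Int) = x := by omega
  rw [h2]
  rfl

-- B's dict lookup cnt.get(x, 0) is score.count(x) for x ∈ [1, k]
lemma B_count (k : Int) (score : List Int) (x : Int) (hx : 0 < x) (hxk : x ≤ k) :
    (score.foldl (fun d s => if 1 ≤ s ∧ s ≤ k then d.insert s (d.getD s 0 + 1) else d)
        PySem.Dict.empty).getD x 0 = (List.count x score : Int) := by
  simp only [PySem.List.foldl_ite_eq_foldl_filter (fun s => 1 ≤ s ∧ s ≤ k)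
      (fun (d : PySem.Dict Int Int) s => d.insert s (d.getD s 0 + 1))]
  rw [PySem.Dict.getD_foldl_insert_add_one]
  rw [List.count_filter (by simp; omega)]
  simp [PySem.Dict.getD_empty]

-- ===== VERDICT (by name: the statement is the Claim_ definition above) =====
theorem solution_spec : Claim_equal_solution := by
  intro k m score _ hpre
  unfold Spec_solution solution solution_alt
  by_cases hk : k < 1
  · rw [PySem.List.pyRange_neg_one_eq_nil (by omega : k ≤ 0)]
    simp
  · have hm : m ≠ 0 := by
      rcases hpre with h | h
      · exact h
      · omega
    simp only []
    have e1 : ((PySem.List.pyRange k 0 (-1)).foldl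
        (fun (st : Int × Int) n =>
          (st.1 + PySem.Int.floordiv
              ((pyGetArr? ((PySem.List.pyRange 1 (k+1) 1).foldl
                  (fun acc num => acc.push (PySem.List.count score num : Int)) #[]) (n-1)).getD 0
                + st.2) m * n * m,
           PySem.Int.mod
              ((pyGetArr? ((PySem.List.pyRange 1 (k+1) 1).foldl
                  (fun acc num => acc.push (PySem.List.count score num : Int)) #[]) (n-1)).getD 0
                + st.2) m))
        (0, 0))
        = ((PySem.List.pyRange k 0 (-1)).foldl
            (fun (st : Int × Int) x =>
              (st.1 + PySem.Int.floordiv ((List.count x score : Int) + st.2) m * x * m,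
               PySem.Int.mod ((List.count x score : Int) + st.2) m))
            (0, 0)) := by
      apply PySem.List.foldl_congr_mem
      intro acc x hxmem
      have hx := PySem.List.mem_pyRange_neg_one.1 hxmem
      rw [A_count k score x hx.1 hx.2]
    have e2 : ((PySem.List.pyRange k 0 (-1)).foldl
        (fun (st : Int × Int) n =>
          (st.1 + PySem.Int.floordiv
              (st.2 + (score.foldl
                  (fun d s => if 1 ≤ s ∧ s ≤ k then d.insert s (d.getD s 0 + 1) else d)
                  PySem.Dict.empty).getD n 0) m * m,
           st.2 + (score.foldl
                  (fun d s => if 1 ≤ s ∧ s ≤ k then d.insert s (d.getD s 0 + 1) else d)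
                  PySem.Dict.empty).getD n 0))
        (0, 0))
        = ((PySem.List.pyRange k 0 (-1)).foldl
            (fun (st : Int × Int) x =>
              (st.1 + PySem.Int.floordiv (st.2 + (List.count x score : Int)) m * m,
               st.2 + (List.count x score : Int)))
            (0, 0)) := by
      apply PySem.List.foldl_congr_mem
      intro acc x hxmem
      have hx := PySem.List.mem_pyRange_neg_one.1 hxmem
      rw [B_count k score x hx.1 hx.2]
    rw [e1, e2]
    have H := loop_eq m hm (fun x => (List.count x score : Int)) k.toNat k (by omega) 0 0 0
    simp only [md_zero, fd_zero, mul_zero, sub_zero] at H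
    simpa using H
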